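-- pv_equiv track=rewrite | github.com/Kbalazs3/The-Keymaker-Python | keymaker.py | pad_up_to
-- ===== SOURCE A (Python) =====
-- import string
--
-- def alphabet_maker():
--     alphabet_string = string.ascii_lowercase
--     alphabet_list = list(alphabet_string)
--     return alphabet_list
--
-- def shift_characters(word, shift):
--     word = word.lower()
--     alphabet_list = alphabet_maker()
--     shifted_word = ""
--     for char in word:
--         index = alphabet_list.index(char) + shift
--         if index >= len(alphabet_list):
--             index = index - len(alphabet_list)
--         shifted_word = shifted_word + alphabet_list[index]
--     return shifted_word
--
-- def pad_up_to(word, shift, n):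
--     word = word.lower()
--     alphabet_list = alphabet_maker()
--     shifted_word = shift_characters(word, shift)
--     new_word = word + shifted_word
--     while len(new_word) < n:
--         shifted_word = shift_characters(word, shift)
--         for letter in shifted_word:
--             if len(new_word) < n:
--                 new_word += letter
--             elif len(new_word) == n:
--                 break
--     return new_word
-- ===== SOURCE B (Python) =====
-- import string
--
-- def pad_up_to(word, shift, n):
--     abc = string.ascii_lowercase
--     w = word.lower()
--     s = "".join(abc[(abc.index(c) + shift) % 26] for c in w)
--     base = w + s
--     need = n - len(base)
--     if need <= 0:
--         return base
--     reps = (need + len(s) - 1) // len(s)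
--     return base + (s * reps)[:need]
-- ===== Notes on version B (the rewrite author's own statement) =====
-- stated objective: simpler
-- what changed: B replaces A's nested while/for loop that appends the Caesar-shifted word character by character with a closed-form construction: shift each character via mod-26 arithmetic in one pass, then append a single ceiling-division repetition of the shifted word truncated to the exact remaining length.
-- crash fix: On nonempty all-letter words whose shift puts some index outside [-26,51] relative to the letter position, A raises IndexError (its single wrap subtraction is insufficient) while B returns the proper Caesar shift via mod 26, e.g. pad_up_to('a', 60, 0) = 'ai'. — e.g. on pad_up_to("a", 60, 0): A raises IndexError, B returns "ai"
import Mathlib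
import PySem

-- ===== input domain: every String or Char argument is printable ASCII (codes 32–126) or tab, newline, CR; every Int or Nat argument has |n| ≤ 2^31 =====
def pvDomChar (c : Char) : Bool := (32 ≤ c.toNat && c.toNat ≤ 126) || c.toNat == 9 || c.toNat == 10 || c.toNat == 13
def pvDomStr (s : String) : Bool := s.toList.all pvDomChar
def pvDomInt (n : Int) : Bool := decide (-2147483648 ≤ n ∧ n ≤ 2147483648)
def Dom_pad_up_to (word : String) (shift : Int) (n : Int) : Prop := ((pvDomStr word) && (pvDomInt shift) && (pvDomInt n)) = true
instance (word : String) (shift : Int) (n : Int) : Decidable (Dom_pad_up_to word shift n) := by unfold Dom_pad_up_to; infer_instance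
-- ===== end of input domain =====

-- B replaces A's nested while/for char-by-char padding with a one-pass mod-26 shift and one
-- truncated ceiling-division repetition of the shifted word (objective: simpler).

-- ===== PORT A =====
-- list(string.ascii_lowercase)
def alphabet_maker : List Char :=
  ['a','b','c','d','e','f','g','h','i','j','k','l','m','n','o','p','q','r','s','t','u','v','w','x','y','z']

-- the for-loop body of shift_characters, one recursive step per character;
-- alphabet_list.index(char) raises ValueError on a non-letter (index? = none) and
-- alphabet_list[index] raises IndexError out of [-26,51] (pyGet? = none): both excluded by Pre_,
-- so the .getD defaults are never reached on admitted inputs.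
def shiftGo (abc : List Char) (shift : Int) : List Char → List Char
  | [] => []
  | c :: cs =>
    let index : Int := (((PySem.List.index? abc c).getD 0 : Nat) : Int) + shift
    let index : Int := if (abc.length : Int) ≤ index then index - (abc.length : Int) else index
    ((PySem.List.pyGet? abc index).getD 'a') :: shiftGo abc shift cs

def shift_characters (word : String) (shift : Int) : String :=
  let word := PySem.Str.lower word
  let abc := alphabet_maker
  String.ofList (shiftGo abc shift word.toList)

-- the inner 'for letter in shifted_word' loop of pad_up_to
def innerForA (n : Int) : List Char → List Char → List Char
  | [], acc => acc
  | l :: ls, acc =>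
    if (acc.length : Int) < n then innerForA n ls (acc ++ [l])
    else if (acc.length : Int) = n then acc
    else innerForA n ls acc

theorem innerForA_len_le (n : Int) : ∀ (ls acc : List Char), acc.length ≤ (innerForA n ls acc).length := by
  intro ls
  induction ls with
  | nil => intro acc; simp [innerForA]
  | cons l ls ih =>
    intro acc
    simp only [innerForA]
    split_ifs with h1 h2
    · have := ih (acc ++ [l]); simp at this; omega
    · omega
    · exact ih acc

theorem innerForA_len_lt (n : Int) (ls acc : List Char) (h : ls ≠ []) (hlt : (acc.length : Int) < n) :
    acc.length < (innerForA n ls acc).length := by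
  cases ls with
  | nil => exact absurd rfl h
  | cons l ls =>
    simp only [innerForA, if_pos hlt]
    have := innerForA_len_le n ls (acc ++ [l])
    simp at this; omega

-- the outer 'while len(new_word) < n' loop; the conjunct sw ≠ [] is a termination guard only:
-- when sw = [] and len < n the Python loop never terminates (excluded by Pre_).
def padLoopA (sw : List Char) (n : Int) (acc : List Char) : List Char :=
  if h : (acc.length : Int) < n ∧ sw ≠ [] then
    padLoopA sw n (innerForA n sw acc)
  else acc
termination_by (n - acc.length).toNat
decreasing_by
  have := innerForA_len_lt n sw acc h.2 h.1
  omega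

def pad_up_to (word : String) (shift : Int) (n : Int) : String :=
  let word := PySem.Str.lower word
  let _abc := alphabet_maker
  let shifted_word := shift_characters word shift
  let new_word := word.toList ++ shifted_word.toList
  String.ofList (padLoopA shifted_word.toList n new_word)

-- ===== PORT B =====
-- Source B: one-pass shift via (abc.index(c) + shift) % 26, then base + (s * reps)[:need];
-- s * reps ported as flatten (replicate reps.toNat s) (reps ≥ 1 in this branch) and the
-- slice [:need] as take need.toNat (need > 0 in this branch).
def pad_up_to_alt (word : String) (shift : Int) (n : Int) : String :=
  let abc := alphabet_maker
  let w := (PySem.Str.lower word).toList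
  let s := w.map (fun c =>
    (PySem.List.pyGet? abc (PySem.Int.mod ((((PySem.List.index? abc c).getD 0 : Nat) : Int) + shift) 26)).getD 'a')
  let base := w ++ s
  let need : Int := n - (base.length : Int)
  if need ≤ 0 then String.ofList base
  else
    let reps : Int := PySem.Int.floordiv (need + (s.length : Int) - 1) (s.length : Int)
    String.ofList (base ++ (List.flatten (List.replicate reps.toNat s)).take need.toNat)

-- ===== PRECONDITION & SPEC =====
-- Pre_ admits exactly the inputs on which A terminates normally: every character of the lowered
-- word is a lowercase letter (else list.index raises ValueError), its alphabet position plus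
-- shift lies in [-26,51] (else alphabet_list[index] raises IndexError), and not (word empty and
-- n > 0) (there A's while loop never terminates).
def Pre_pad_up_to (word : String) (shift : Int) (n : Int) : Prop :=
  ((PySem.Chars.lower word.toList).all (fun c =>
      decide (97 ≤ c.toNat ∧ c.toNat ≤ 122 ∧
        -26 ≤ (c.toNat : Int) - 97 + shift ∧ (c.toNat : Int) - 97 + shift ≤ 51)) = true) ∧
  (word ≠ "" ∨ n ≤ 0)
instance (word : String) (shift : Int) (n : Int) : Decidable (Pre_pad_up_to word shift n) := by
  unfold Pre_pad_up_to; infer_instance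

def pvWitness_pad_up_to : String × Int × Int := ("abc", 2, 9)

-- On nonempty all-letter words whose shift puts some index outside [-26,51] relative to the letter
-- position, A raises IndexError (its single wrap subtraction is insufficient) while B returns the
-- proper Caesar shift via mod 26.
def Raises_pad_up_to (word : String) (shift : Int) (n : Int) : Prop :=
  ((PySem.Chars.lower word.toList).all (fun c => decide (97 ≤ c.toNat ∧ c.toNat ≤ 122)) = true) ∧
  word ≠ "" ∧
  ((PySem.Chars.lower word.toList).any (fun c =>
      decide ((c.toNat : Int) - 97 + shift < -26 ∨ 51 < (c.toNat : Int) - 97 + shift)) = true)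
instance (word : String) (shift : Int) (n : Int) : Decidable (Raises_pad_up_to word shift n) := by
  unfold Raises_pad_up_to; infer_instance

def pvRaiseWitness_pad_up_to : String × Int × Int := ("a", 60, 0)
def pvRaiseWitnessOut_pad_up_to : String := "ai"

def Spec_pad_up_to (word : String) (shift : Int) (n : Int) (out : String) : Prop := out = pad_up_to_alt word shift n
instance (word : String) (shift : Int) (n : Int) (out : String) : Decidable (Spec_pad_up_to word shift n out) := by unfold Spec_pad_up_to; infer_instance

-- ===== CLAIM (what is proved, stated in full; the proofs are below) =====
def Claim_equal_pad_up_to : Prop := ∀ (word : String) (shift : Int) (n : Int), Dom_pad_up_to word shift n → Pre_pad_up_to word shift n → Spec_pad_up_to word shift n (pad_up_to word shift n)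

def Claim_raises_pad_up_to : Prop := (∀ (word : String) (shift : Int) (n : Int), Dom_pad_up_to word shift n → Raises_pad_up_to word shift n → ¬ Pre_pad_up_to word shift n) ∧ (Dom_pad_up_to (pvRaiseWitness_pad_up_to.1) (pvRaiseWitness_pad_up_to.2.1) (pvRaiseWitness_pad_up_to.2.2) ∧ Raises_pad_up_to (pvRaiseWitness_pad_up_to.1) (pvRaiseWitness_pad_up_to.2.1) (pvRaiseWitness_pad_up_to.2.2) ∧ pad_up_to_alt (pvRaiseWitness_pad_up_to.1) (pvRaiseWitness_pad_up_to.2.1) (pvRaiseWitness_pad_up_to.2.2) = pvRaiseWitnessOut_pad_up_to)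

-- ===== LEMMAS AND PROOFS =====

theorem index?_abc (c : Char) (hc : c ∈ alphabet_maker) :
    PySem.List.index? alphabet_maker c = some (c.toNat - 97) ∧ 97 ≤ c.toNat ∧ c.toNat ≤ 122 := by
  fin_cases hc <;> exact ⟨by decide, by decide, by decide⟩

theorem lowerChar_abc (c : Char) (hc : c ∈ alphabet_maker) : PySem.Chars.lowerChar c = c := by
  fin_cases hc <;> decide

theorem mem_abc_of_bounds (c : Char) (h1 : 97 ≤ c.toNat) (h2 : c.toNat ≤ 122) :
    c ∈ alphabet_maker := by
  have hc : c = Char.ofNat c.toNat := (Char.ofNat_toNat c).symm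
  rw [hc]
  interval_cases h : c.toNat <;> decide

theorem pyGet?_congr_mod (xs : List Char) (i j : Int) (h1 : -(xs.length : Int) ≤ i)
    (h2 : i < xs.length) (h3 : -(xs.length : Int) ≤ j) (h4 : j < xs.length)
    (h5 : (xs.length : Int) ∣ (i - j)) : PySem.List.pyGet? xs i = PySem.List.pyGet? xs j := by
  obtain ⟨k, hk⟩ := h5
  have hl : 0 < (xs.length : Int) := by omega
  have hk2 : k ≤ 1 := by
    by_contra hcon
    push_neg at hcon
    have : (xs.length : Int) * 2 ≤ (xs.length : Int) * k :=
      mul_le_mul_of_nonneg_left (by omega) (by omega)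
    omega
  have hk1 : -1 ≤ k := by
    by_contra hcon
    push_neg at hcon
    have : (xs.length : Int) * k ≤ (xs.length : Int) * (-2) :=
      mul_le_mul_of_nonneg_left (by omega) (by omega)
    omega
  have hcases : k = -1 ∨ k = 0 ∨ k = 1 := by omega
  simp only [PySem.List.pyGet?, PySem.List.pyIdx?]
  rcases hcases with h | h | h <;> subst h <;>
    split_ifs <;> first
      | rfl
      | omega
      | (congr 2; omega)

theorem char_eq (shift : Int) (c : Char) (hc : c ∈ alphabet_maker)
    (hlo : -26 ≤ (c.toNat : Int) - 97 + shift) (hhi : (c.toNat : Int) - 97 + shift ≤ 51) :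
    (PySem.List.pyGet? alphabet_maker
      (if (alphabet_maker.length : Int) ≤ (((PySem.List.index? alphabet_maker c).getD 0 : Nat) : Int) + shift
       then (((PySem.List.index? alphabet_maker c).getD 0 : Nat) : Int) + shift - (alphabet_maker.length : Int)
       else (((PySem.List.index? alphabet_maker c).getD 0 : Nat) : Int) + shift)).getD 'a'
    = (PySem.List.pyGet? alphabet_maker
        (PySem.Int.mod ((((PySem.List.index? alphabet_maker c).getD 0 : Nat) : Int) + shift) 26)).getD 'a' := by
  obtain ⟨hidx, hge, hle⟩ := index?_abc c hc
  rw [hidx]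
  simp only [Option.getD_some]
  have hlen : (alphabet_maker.length : Int) = 26 := by decide
  set i0 : Int := (((c.toNat - 97 : Nat) : Int)) + shift with hi0
  have hp : ((c.toNat - 97 : Nat) : Int) = (c.toNat : Int) - 97 := by omega
  have hb1 : -26 ≤ i0 := by omega
  have hb2 : i0 ≤ 51 := by omega
  have hmnn : 0 ≤ PySem.Int.mod i0 26 := PySem.Int.mod_nonneg i0 (by omega)
  have hmlt : PySem.Int.mod i0 26 < 26 := PySem.Int.mod_lt i0 (by omega)
  have hdecomp := PySem.Int.floordiv_mul_add_mod i0 26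
  congr 1
  rw [hlen]
  apply pyGet?_congr_mod <;> rw [hlen]
  · split_ifs <;> omega
  · split_ifs <;> omega
  · omega
  · omega
  · refine ⟨PySem.Int.floordiv i0 26 - (if (26 : Int) ≤ i0 then 1 else 0), ?_⟩
    split_ifs <;> omega

theorem shiftGo_eq_map (shift : Int) : ∀ (l : List Char),
    (∀ c ∈ l, 97 ≤ c.toNat ∧ c.toNat ≤ 122 ∧
      -26 ≤ (c.toNat : Int) - 97 + shift ∧ (c.toNat : Int) - 97 + shift ≤ 51) →
    shiftGo alphabet_maker shift l = l.map (fun c =>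
      (PySem.List.pyGet? alphabet_maker
        (PySem.Int.mod ((((PySem.List.index? alphabet_maker c).getD 0 : Nat) : Int) + shift) 26)).getD 'a') := by
  intro l
  induction l with
  | nil => intro _; simp [shiftGo]
  | cons c cs ih =>
    intro h
    obtain ⟨h97, h122, hlo, hhi⟩ := h c (by simp)
    simp only [shiftGo, List.map_cons]
    rw [ih (fun x hx => h x (by simp [hx]))]
    rw [char_eq shift c (mem_abc_of_bounds c h97 h122) hlo hhi]

theorem lower_fix (l : List Char) (h : ∀ c ∈ l, c ∈ alphabet_maker) : PySem.Chars.lower l = l := by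
  simp only [PySem.Chars.lower]
  exact (List.map_congr_left (fun c hc => lowerChar_abc c (h c hc))).trans (List.map_id l)

-- the shape both paddings share: append s whole while more than |s| is missing, else its prefix
def padChunk (m : Nat) (s : List Char) : List Char :=
  if _h0 : s.length = 0 then []
  else if m ≤ s.length then s.take m
  else s ++ padChunk (m - s.length) s
termination_by m
decreasing_by omega

theorem innerForA_eq (n : Int) : ∀ (sw acc : List Char), (acc.length : Int) ≤ n →
    innerForA n sw acc = acc ++ sw.take (n - acc.length).toNat := by
  intro sw
  induction sw with
  | nil => intro acc _; simp [innerForA]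
  | cons l ls ih =>
    intro acc hle
    simp only [innerForA]
    split_ifs with h1 h2
    · rw [ih (acc ++ [l]) (by simp; omega)]
      have : (n - acc.length).toNat = ((n - (acc.length + 1)).toNat) + 1 := by omega
      simp only [this, List.take_succ_cons, List.append_assoc, List.length_append,
        List.length_cons, List.length_nil]
      norm_num
    · have : (n - acc.length).toNat = 0 := by omega
      simp [this]
    · omega

theorem padChunk_zero (s : List Char) : padChunk 0 s = [] := by
  rw [padChunk]
  split_ifs with h1 h2
  · rfl
  · simp
  · omega

theorem padChunk_small (s : List Char) (m : Nat) (h0 : s.length ≠ 0) (h : m ≤ s.length) :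
    padChunk m s = s.take m := by
  rw [padChunk]
  simp [h0, h]

theorem padChunk_big (s : List Char) (m : Nat) (h0 : s.length ≠ 0) (h : s.length < m) :
    padChunk m s = s ++ padChunk (m - s.length) s := by
  rw [padChunk]
  simp [h0]
  omega

theorem padLoopA_eq (sw : List Char) (hsw : sw ≠ []) (n : Int) (acc : List Char) :
    padLoopA sw n acc = acc ++ padChunk (n - acc.length).toNat sw := by
  have hswlen : sw.length ≠ 0 := fun h => hsw (List.eq_nil_of_length_eq_zero h)
  fun_induction padLoopA sw n acc with
  | case1 acc h ih =>
    obtain ⟨hlt, -⟩ := h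
    rw [innerForA_eq n sw acc (le_of_lt hlt)] at ih ⊢
    set m : Nat := (n - acc.length).toNat with hm
    have hm1 : 1 ≤ m := by omega
    by_cases hcase : m ≤ sw.length
    · have htk : (sw.take m).length = m := by simp; omega
      have hz : (n - ((acc ++ sw.take m).length : Int)).toNat = 0 := by simp [htk]; omega
      rw [hz, padChunk_zero, List.append_nil] at ih
      rw [ih, padChunk_small sw m hswlen hcase]
    · have htk : sw.take m = sw := List.take_of_length_le (by omega)
      rw [htk] at ih ⊢
      have hz : (n - ((acc ++ sw).length : Int)).toNat = m - sw.length := by simp; omega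
      rw [hz] at ih
      rw [ih, padChunk_big sw m hswlen (by omega), List.append_assoc]
  | case2 acc h =>
    have hz : (n - acc.length).toNat = 0 := by
      rcases not_and_or.mp h with h' | h'
      · omega
      · exact absurd hsw h'
    rw [hz, padChunk_zero, List.append_nil]

theorem repChunk (s : List Char) (hs : s ≠ []) : ∀ (m : Nat), 1 ≤ m →
    (List.flatten (List.replicate ((m + s.length - 1) / s.length) s)).take m = padChunk m s := by
  have hlen : s.length ≠ 0 := fun h => hs (List.eq_nil_of_length_eq_zero h)
  intro m
  induction m using Nat.strong_induction_on with
  | _ m ih =>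
    intro hm1
    by_cases hcase : m ≤ s.length
    · have hdiv : (m + s.length - 1) / s.length = 1 := by
        apply Nat.div_eq_of_lt_le <;> omega
      rw [hdiv, padChunk_small s m hlen hcase]
      simp
    · have hdiv : (m + s.length - 1) / s.length = ((m - s.length) + s.length - 1) / s.length + 1 := by
        have h1 : m + s.length - 1 = ((m - s.length) + s.length - 1) + s.length := by omega
        rw [h1, Nat.add_div_right _ (by omega)]
      rw [hdiv, List.replicate_succ, List.flatten_cons,
        List.take_append, List.take_of_length_le (by omega),
        ih (m - s.length) (by omega) (by omega),
        padChunk_big s m hlen (by omega)]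

theorem toList_ne_nil (w : String) (h : w ≠ "") : w.toList ≠ [] :=
  fun hnil => h (String.toList_eq_nil_iff.mp hnil)

set_option maxHeartbeats 2000000 in
theorem pad_up_to_spec : Claim_equal_pad_up_to := by
  intro word shift n _hdom hpre
  obtain ⟨hchars0, hne⟩ := hpre
  unfold Spec_pad_up_to pad_up_to pad_up_to_alt shift_characters
  simp only
  set w : List Char := (PySem.Str.lower word).toList with hw
  have hchars : ∀ c ∈ w, 97 ≤ c.toNat ∧ c.toNat ≤ 122 ∧
      -26 ≤ (c.toNat : Int) - 97 + shift ∧ (c.toNat : Int) - 97 + shift ≤ 51 := by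
    intro c hc
    rw [hw, PySem.Str.toList_lower] at hc
    exact of_decide_eq_true (List.all_eq_true.mp hchars0 c hc)
  have hmem : ∀ c ∈ w, c ∈ alphabet_maker :=
    fun c hc => mem_abc_of_bounds c (hchars c hc).1 (hchars c hc).2.1
  -- shift_characters lowers its (already lowered) argument again; under Pre_ that is the identity
  have hlow : (PySem.Str.lower (PySem.Str.lower word)).toList = w := by
    rw [PySem.Str.toList_lower, ← hw]
    exact lower_fix w hmem
  set s : List Char := w.map (fun c =>
    (PySem.List.pyGet? alphabet_maker
      (PySem.Int.mod ((((PySem.List.index? alphabet_maker c).getD 0 : Nat) : Int) + shift) 26)).getD 'a') with hsdef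
  have hshift : (String.ofList (shiftGo alphabet_maker shift (PySem.Str.lower (PySem.Str.lower word)).toList)).toList = s := by
    rw [hlow]
    rw [String.toList_ofList]
    exact shiftGo_eq_map shift w hchars
  rw [hshift]
  have hslen : s.length = w.length := by simp [hsdef]
  by_cases hneed : n - (((w ++ s).length : Int)) ≤ 0
  · rw [if_pos hneed]
    rw [padLoopA, dif_neg (by rintro ⟨hlt, -⟩; omega)]
  · rw [if_neg hneed]
    -- word is nonempty here, so w and s are nonempty
    have hwne : w ≠ [] := by
      rcases hne with h | h
      · rw [hw, PySem.Str.toList_lower, PySem.Chars.lower]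
        simpa using toList_ne_nil word h
      · exfalso; apply hneed; simp; omega
    have hsne : s ≠ [] := by
      intro hcontra
      apply hwne
      have := congrArg List.length hcontra
      rw [hslen] at this
      exact List.eq_nil_of_length_eq_zero this
    rw [padLoopA_eq s hsne n (w ++ s)]
    set need : Int := n - ((w ++ s).length : Int) with hneeddef
    have hn1 : 1 ≤ need := by omega
    have hsl : 0 < s.length := List.length_pos_iff.mpr hsne
    have hfl : PySem.Int.floordiv (need + (s.length : Int) - 1) (s.length : Int)
        = ((need.toNat + s.length - 1) / s.length : Nat) := by
      rw [PySem.Int.floordiv_eq_ediv_of_pos (by exact_mod_cast hsl)]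
      have : need + (s.length : Int) - 1 = ((need.toNat + s.length - 1 : Nat) : Int) := by omega
      rw [this, Int.natCast_div]
    rw [hfl]
    rw [Int.toNat_natCast]
    exact congrArg String.ofList (congrArg ((w ++ s) ++ ·) (repChunk s hsne need.toNat (by omega)).symm)

-- ===== VERDICT (by name: the statement is the Claim_ definition above) =====
set_option maxRecDepth 8000 in
theorem pad_up_to_raises : Claim_raises_pad_up_to := by
  unfold Claim_raises_pad_up_to
  constructor
  · intro word shift n _hdom hraise hpre
    obtain ⟨-, -, hany⟩ := hraise
    obtain ⟨hall, -⟩ := hpre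
    obtain ⟨c, hc, hbadb⟩ := List.any_eq_true.mp hany
    have h1 := of_decide_eq_true (List.all_eq_true.mp hall c hc)
    have h2 := of_decide_eq_true hbadb
    omega
  · exact ⟨by decide, by decide, rfl⟩

-- self-check: the raise witness satisfies Raises_ and B's port returns the stated value there
theorem pad_up_to_raises_witness_ok :
    Raises_pad_up_to pvRaiseWitness_pad_up_to.1 pvRaiseWitness_pad_up_to.2.1 pvRaiseWitness_pad_up_to.2.2 ∧
    pad_up_to_alt pvRaiseWitness_pad_up_to.1 pvRaiseWitness_pad_up_to.2.1 pvRaiseWitness_pad_up_to.2.2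
      = pvRaiseWitnessOut_pad_up_to :=
  ⟨pad_up_to_raises.2.2.1, pad_up_to_raises.2.2.2⟩
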